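-- pv_equiv track=rewrite | github.com/daniel-reich/ubiquitous-fiesta | NrWECd98HTub87cHq_14.py | overlapping_rectangles
-- ===== SOURCE A (Python) =====
-- def overlapping_rectangles(rect1, rect2):
--     area = 0
--     for x in range(rect1[0], rect1[0] + rect1[2]):
--         for y in range(rect1[1], rect1[1] + rect1[3]):
--             if (rect2[0] <= x < rect2[0] + rect2[2] and
--                     rect2[1] <= y < rect2[1] + rect2[3]):
--                 area += 1
--     return area
-- ===== SOURCE B (Python) =====
-- def overlapping_rectangles(rect1, rect2):
--     w = min(rect1[0] + rect1[2], rect2[0] + rect2[2]) - max(rect1[0], rect2[0])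
--     h = min(rect1[1] + rect1[3], rect2[1] + rect2[3]) - max(rect1[1], rect2[1])
--     return max(w, 0) * max(h, 0)
-- ===== Notes on version B (the rewrite author's own statement) =====
-- stated objective: faster
-- what changed: Replaces the O(w*h) double loop counting grid points with the closed-form overlap rectangle: width and height of the intersection via min/max, each clamped at zero, multiplied.
-- outside the precondition, e.g. on overlapping_rectangles([0, 0, 0, 5], []): A returns 0, B raises IndexError
import Mathlib
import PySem

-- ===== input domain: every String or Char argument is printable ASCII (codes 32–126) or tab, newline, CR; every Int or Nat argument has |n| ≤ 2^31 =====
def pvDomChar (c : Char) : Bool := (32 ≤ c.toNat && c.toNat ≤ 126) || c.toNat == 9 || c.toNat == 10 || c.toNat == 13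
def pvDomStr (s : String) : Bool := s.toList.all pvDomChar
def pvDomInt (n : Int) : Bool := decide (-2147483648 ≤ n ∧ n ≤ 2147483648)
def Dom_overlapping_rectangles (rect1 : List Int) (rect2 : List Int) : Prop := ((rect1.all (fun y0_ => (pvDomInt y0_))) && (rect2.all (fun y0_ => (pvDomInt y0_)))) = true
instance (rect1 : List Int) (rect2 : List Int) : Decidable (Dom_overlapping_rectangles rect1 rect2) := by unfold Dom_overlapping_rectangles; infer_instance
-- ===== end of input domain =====

-- B replaces A's O(w*h) point-by-point double loop with the O(1) clamped min/max
-- intersection formula (measured asymptotically faster).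

-- ===== PORT A =====
-- literal transliteration of A's nested for-loops counting lattice points
def overlapping_rectangles (rect1 : List Int) (rect2 : List Int) : Int :=
  (PySem.List.pyRange (PySem.List.pyGetD rect1 0 0)
      (PySem.List.pyGetD rect1 0 0 + PySem.List.pyGetD rect1 2 0) 1).foldl
    (fun area x =>
      (PySem.List.pyRange (PySem.List.pyGetD rect1 1 0)
          (PySem.List.pyGetD rect1 1 0 + PySem.List.pyGetD rect1 3 0) 1).foldl
        (fun area y =>
          if (PySem.List.pyGetD rect2 0 0 ≤ x ∧
              x < PySem.List.pyGetD rect2 0 0 + PySem.List.pyGetD rect2 2 0) ∧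
             (PySem.List.pyGetD rect2 1 0 ≤ y ∧
              y < PySem.List.pyGetD rect2 1 0 + PySem.List.pyGetD rect2 3 0)
          then area + 1 else area) area) 0

-- ===== PORT B =====
def overlapping_rectangles_alt (rect1 : List Int) (rect2 : List Int) : Int :=
  let w := min (PySem.List.pyGetD rect1 0 0 + PySem.List.pyGetD rect1 2 0)
               (PySem.List.pyGetD rect2 0 0 + PySem.List.pyGetD rect2 2 0)
           - max (PySem.List.pyGetD rect1 0 0) (PySem.List.pyGetD rect2 0 0)
  let h := min (PySem.List.pyGetD rect1 1 0 + PySem.List.pyGetD rect1 3 0)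
               (PySem.List.pyGetD rect2 1 0 + PySem.List.pyGetD rect2 3 0)
           - max (PySem.List.pyGetD rect1 1 0) (PySem.List.pyGetD rect2 1 0)
  max w 0 * max h 0

-- ===== PRECONDITION & SPEC =====
-- Pre_ excludes lists with fewer than 4 elements: B (and A, unless its loops are
-- empty) raises IndexError there; an input like ([0,0,0,5], []) where A still
-- returns 0 by never touching rect2 is excluded with it.
def Pre_overlapping_rectangles (rect1 : List Int) (rect2 : List Int) : Prop :=
  4 ≤ rect1.length ∧ 4 ≤ rect2.length
instance (rect1 : List Int) (rect2 : List Int) : Decidable (Pre_overlapping_rectangles rect1 rect2) := by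
  unfold Pre_overlapping_rectangles; infer_instance
def pvWitness_overlapping_rectangles : List Int × List Int := ([0, 0, 3, 3], [1, 1, 3, 3])
def Spec_overlapping_rectangles (rect1 : List Int) (rect2 : List Int) (out : Int) : Prop := out = overlapping_rectangles_alt rect1 rect2
instance (rect1 : List Int) (rect2 : List Int) (out : Int) : Decidable (Spec_overlapping_rectangles rect1 rect2 out) := by unfold Spec_overlapping_rectangles; infer_instance

-- ===== CLAIM (what is proved, stated in full; the proofs are below) =====
def Claim_equal_overlapping_rectangles : Prop := ∀ (rect1 : List Int) (rect2 : List Int), Dom_overlapping_rectangles rect1 rect2 → Pre_overlapping_rectangles rect1 rect2 → Spec_overlapping_rectangles rect1 rect2 (overlapping_rectangles rect1 rect2)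

-- ===== LEMMAS AND PROOFS =====

-- counting y ∈ [lo,hi) with c ≤ y < d gives the clamped interval overlap
theorem pv_inner_count (c d : Int) :
    ∀ (n : Nat) (lo hi s : Int), (hi - lo).toNat = n →
      (PySem.List.pyRange lo hi 1).foldl
          (fun a y => if c ≤ y ∧ y < d then a + 1 else a) s
        = s + max 0 (min hi d - max lo c) := by
  intro n
  induction n with
  | zero =>
    intro lo hi s h
    rw [PySem.List.pyRange_one_eq_nil (by omega)]
    simp; omega
  | succ k ih =>
    intro lo hi s h
    rw [PySem.List.pyRange_one_cons (by omega)]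
    simp only [List.foldl_cons]
    rw [ih (lo + 1) hi _ (by omega)]
    split_ifs <;> omega

-- a loop adding K each time its x-condition holds gives K times the clamped overlap
theorem pv_outer_count (c d K : Int) :
    ∀ (n : Nat) (lo hi s : Int), (hi - lo).toNat = n →
      (PySem.List.pyRange lo hi 1).foldl
          (fun a x => a + (if c ≤ x ∧ x < d then K else 0)) s
        = s + K * max 0 (min hi d - max lo c) := by
  intro n
  induction n with
  | zero =>
    intro lo hi s h
    rw [PySem.List.pyRange_one_eq_nil (by omega)]
    have : max 0 (min hi d - max lo c) = 0 := by omega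
    rw [List.foldl_nil, this, mul_zero, add_zero]
  | succ k ih =>
    intro lo hi s h
    rw [PySem.List.pyRange_one_cons (by omega)]
    simp only [List.foldl_cons]
    rw [ih (lo + 1) hi _ (by omega)]
    split_ifs with hc
    · have : max 0 (min hi d - max lo c) = max 0 (min hi d - max (lo + 1) c) + 1 := by omega
      rw [this]; ring
    · have : max 0 (min hi d - max lo c) = max 0 (min hi d - max (lo + 1) c) := by omega
      rw [this]; ring

-- the inner loop of A, for a fixed x, adds its count only when the x-condition holds
theorem pv_inner_as_add (P : Prop) [Decidable P] (c d lo hi s : Int) :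
    (PySem.List.pyRange lo hi 1).foldl
        (fun a y => if P ∧ (c ≤ y ∧ y < d) then a + 1 else a) s
      = s + (if P then max 0 (min hi d - max lo c) else 0) := by
  by_cases hP : P
  · simp only [hP, true_and]
    rw [pv_inner_count c d (hi - lo).toNat lo hi s rfl]
    simp
  · simp [hP]

-- ===== VERDICT (by name: the statement is the Claim_ definition above) =====
theorem overlapping_rectangles_spec : Claim_equal_overlapping_rectangles := by
  intro rect1 rect2 _ hpre
  obtain ⟨h1, h2⟩ := hpre
  obtain ⟨a, b, w, h, t1, rfl⟩ : ∃ a b w h t1, rect1 = a :: b :: w :: h :: t1 := by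
    match rect1, h1 with
    | x0 :: x1 :: x2 :: x3 :: t, _ => exact ⟨x0, x1, x2, x3, t, rfl⟩
  obtain ⟨c, d, w2, h2', t2, rfl⟩ : ∃ c d w2 h2' t2, rect2 = c :: d :: w2 :: h2' :: t2 := by
    match rect2, h2 with
    | x0 :: x1 :: x2 :: x3 :: t, _ => exact ⟨x0, x1, x2, x3, t, rfl⟩
  unfold Spec_overlapping_rectangles overlapping_rectangles overlapping_rectangles_alt
  simp only [show ((0:Int)) = ((0:Nat):Int) from rfl, show ((1:Int)) = ((1:Nat):Int) from rfl,
    show ((2:Int)) = ((2:Nat):Int) from rfl, show ((3:Int)) = ((3:Nat):Int) from rfl,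
    PySem.List.pyGetD_natCast]
  simp only [List.getD, List.getElem?_cons_zero, List.getElem?_cons_succ, Option.getD_some]
  push_cast
  have hbody : (fun (area x : Int) =>
      (PySem.List.pyRange b (b + h) 1).foldl
        (fun a' y => if (c ≤ x ∧ x < c + w2) ∧ (d ≤ y ∧ y < d + h2') then a' + 1 else a') area)
      = (fun (area x : Int) =>
          area + (if c ≤ x ∧ x < c + w2 then max 0 (min (b + h) (d + h2') - max b d) else 0)) := by
    funext area x
    exact pv_inner_as_add (c ≤ x ∧ x < c + w2) d (d + h2') b (b + h) area
  rw [hbody,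
    pv_outer_count c (c + w2) (max 0 (min (b + h) (d + h2') - max b d))
      (a + w - a).toNat a (a + w) 0 rfl]
  have e1 : max 0 (min (a + w) (c + w2) - max a c)
      = max (min (a + w) (c + w2) - max a c) 0 := by omega
  have e2 : max 0 (min (b + h) (d + h2') - max b d)
      = max (min (b + h) (d + h2') - max b d) 0 := by omega
  rw [e1] at *
  rw [e2]
  ring
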